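-- pv_equiv track=rewrite | github.com/jangg7725-a11y/unteim_root | engine/yongshin_analyzer.py | _pick_yongshin_from_counts
-- ===== SOURCE A (Python) =====
-- from typing import Dict, Any, List, Tuple
--
-- def _pick_yongshin_from_counts(counts: Dict[str, int]) -> Tuple[List[str], List[str], List[str]]:
--     """
--     오행 분포 기반 간단 용신/기신 후보 추출:
--
--     - 가장 약한 오행 → 용신 후보
--     - 가장 강한 오행 → 기신 후보
--     - 나머지       → 희신 후보
--     """
--     if not counts:
--         return [], [], []
--
--     items = sorted(counts.items(), key=lambda kv: kv[1])
--     min_val = items[0][1]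
--     max_val = items[-1][1]
--
--     yongshin_list = [k for k, v in items if v == min_val]
--     gishin_list = [k for k, v in items if v == max_val]
--     heeshin_list = [k for k, v in items if k not in yongshin_list and k not in gishin_list]
--
--     return yongshin_list, heeshin_list, gishin_list
-- ===== SOURCE B (Python) =====
-- from typing import Dict, List, Tuple
--
-- def _pick_yongshin_from_counts(counts: Dict[str, int]) -> Tuple[List[str], List[str], List[str]]:
--     if not counts:
--         return [], [], []
--
--     # bucket keys by their count value (insertion order within a bucket)
--     buckets: Dict[int, List[str]] = {}
--     for k, v in counts.items():
--         buckets.setdefault(v, []).append(k)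
--
--     vals = sorted(buckets)  # distinct values only, ascending
--     heeshin_list = [k for c in vals[1:-1] for k in buckets[c]]
--     return buckets[vals[0]], heeshin_list, buckets[vals[-1]]
-- ===== Notes on version B (the rewrite author's own statement) =====
-- stated objective: faster
-- what changed: B replaces A's full sort of the items plus three comprehension scans (one doing an O(n) 'not in list' membership test per item) by a value->keys bucket dict built in one pass, sorting only the distinct values and reading yongshin/heeshin/gishin off the first, middle and last buckets.
import Mathlib
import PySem

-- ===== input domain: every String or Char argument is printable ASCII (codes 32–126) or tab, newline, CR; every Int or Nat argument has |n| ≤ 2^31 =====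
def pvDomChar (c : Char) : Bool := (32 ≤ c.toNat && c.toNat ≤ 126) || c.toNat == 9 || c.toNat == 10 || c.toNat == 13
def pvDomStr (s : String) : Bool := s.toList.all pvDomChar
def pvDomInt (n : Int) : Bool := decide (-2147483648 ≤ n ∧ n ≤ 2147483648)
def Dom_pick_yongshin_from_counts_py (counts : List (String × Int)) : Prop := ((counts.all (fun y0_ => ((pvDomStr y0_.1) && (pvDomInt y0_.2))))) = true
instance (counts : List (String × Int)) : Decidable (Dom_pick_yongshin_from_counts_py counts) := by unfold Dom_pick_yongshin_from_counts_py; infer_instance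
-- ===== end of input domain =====

-- B replaces A's sort of all items plus three comprehension scans by a value→keys bucket
-- dict built in one pass, sorting only the distinct values (objective: faster; measured).

-- ===== PORT A =====
def pick_yongshin_from_counts_py (counts : List (String × Int)) : List String × List String × List String :=
  if counts = [] then ([], [], [])
  else
    let items := PySem.List.sorted counts (fun kv => kv.2)
    let min_val := (PySem.List.pyGetD items 0 ("", 0)).2      -- items[0][1]; in range since counts ≠ []
    let max_val := (PySem.List.pyGetD items (-1) ("", 0)).2   -- items[-1][1]; in range since counts ≠ []
    let yongshin_list := (items.filter (fun kv => kv.2 == min_val)).map (fun kv => kv.1)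
    let gishin_list := (items.filter (fun kv => kv.2 == max_val)).map (fun kv => kv.1)
    let heeshin_list := (items.filter (fun kv =>
        !(yongshin_list.contains kv.1) && !(gishin_list.contains kv.1))).map (fun kv => kv.1)
    (yongshin_list, heeshin_list, gishin_list)

-- ===== PORT B =====
def pick_yongshin_from_counts_py_alt (counts : List (String × Int)) : List String × List String × List String :=
  if counts = [] then ([], [], [])
  else
    -- buckets.setdefault(v, []).append(k)  =  modify v [] (· ++ [k])
    let buckets : PySem.Dict Int (List String) :=
      counts.foldl (fun d kv => d.modify kv.2 [] (fun l => l ++ [kv.1])) PySem.Dict.empty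
    let vals := PySem.List.sorted buckets.keys (fun v => v)   -- sorted(buckets)
    let heeshin_list := (PySem.List.slice vals (some 1) (some (-1))).flatMap
      (fun c => buckets.getD c [])
    (buckets.getD (PySem.List.pyGetD vals 0 0) [], heeshin_list,
     buckets.getD (PySem.List.pyGetD vals (-1) 0) [])

-- ===== PRECONDITION & SPEC =====
-- Pre_ excludes association lists with duplicate keys: the Python argument is a dict, which
-- cannot contain duplicate keys, so behaviour on such lists is an artefact of the list encoding.
def Pre_pick_yongshin_from_counts_py (counts : List (String × Int)) : Prop :=
  (counts.map Prod.fst).Nodup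
instance (counts : List (String × Int)) : Decidable (Pre_pick_yongshin_from_counts_py counts) := by
  unfold Pre_pick_yongshin_from_counts_py; infer_instance

def pvWitness_pick_yongshin_from_counts_py : (List (String × Int)) := [("a", 1), ("b", 2), ("c", 2)]

def Spec_pick_yongshin_from_counts_py (counts : List (String × Int)) (out : List String × List String × List String) : Prop := out = pick_yongshin_from_counts_py_alt counts
instance (counts : List (String × Int)) (out : List String × List String × List String) : Decidable (Spec_pick_yongshin_from_counts_py counts out) := by unfold Spec_pick_yongshin_from_counts_py; infer_instance

-- ===== CLAIM (what is proved, stated in full; the proofs are below) =====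
def Claim_equal_pick_yongshin_from_counts_py : Prop := ∀ (counts : List (String × Int)), Dom_pick_yongshin_from_counts_py counts → Pre_pick_yongshin_from_counts_py counts → Spec_pick_yongshin_from_counts_py counts (pick_yongshin_from_counts_py counts)

-- ===== LEMMAS AND PROOFS =====

-- xs[1:-1] is tail-then-dropLast
lemma pv_slice_one_neg_one {α : Type} (xs : List α) :
    PySem.List.slice xs (some 1) (some (-1)) = xs.tail.dropLast := by
  cases xs with
  | nil => rfl
  | cons a t =>
    simp [PySem.List.slice, PySem.List.clampIdx, List.dropLast_eq_take]
    rw [if_neg (by omega : ¬((t.length : Int) < 0))]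
    omega

lemma pv_filter_insertBy {α : Type} (key : α → Int) (p : α → Bool) (x : α) (l : List α)
    (hl : l.Pairwise (fun a b => key a ≤ key b)) :
    (PySem.List.insertBy (fun a b => decide (key a < key b)) x l).filter p =
      if p x then PySem.List.insertBy (fun a b => decide (key a < key b)) x (l.filter p)
      else l.filter p := by
  induction l with
  | nil => by_cases hpx : p x <;> simp [PySem.List.insertBy, List.filter, hpx]
  | cons y ys ih =>
    rw [List.pairwise_cons] at hl
    obtain ⟨hy, hys⟩ := hl
    by_cases hlt : key x < key y
    · have hhead : ∀ m : List α, (∀ z ∈ m, key y ≤ key z) →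
          PySem.List.insertBy (fun a b => decide (key a < key b)) x m =
            x :: m := by
        intro m hm
        cases m with
        | nil => rfl
        | cons z zs =>
          have : key x < key z := lt_of_lt_of_le hlt (hm z (by simp))
          simp [PySem.List.insertBy, this]
      rw [show PySem.List.insertBy (fun a b => decide (key a < key b)) x (y :: ys) =
          x :: y :: ys by simp [PySem.List.insertBy, hlt]]
      by_cases hpx : p x
      · rw [hhead ((y :: ys).filter p) (fun z hz => by
          rcases List.mem_cons.1 (List.mem_of_mem_filter hz) with h | h
          · exact le_of_eq (by rw [h])
          · exact hy z h)]
        simp [List.filter, hpx]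
      · simp [List.filter, hpx]
    · rw [show PySem.List.insertBy (fun a b => decide (key a < key b)) x (y :: ys) =
          y :: PySem.List.insertBy (fun a b => decide (key a < key b)) x ys by
            simp [PySem.List.insertBy, hlt]]
      by_cases hpy : p y <;> by_cases hpx : p x <;>
        simp [List.filter, hpy, hpx, ih hys] <;>
        simp [PySem.List.insertBy, hlt]

lemma pv_filter_sorted {α : Type} (key : α → Int) (p : α → Bool) (l : List α) :
    (PySem.List.sorted l key).filter p = PySem.List.sorted (l.filter p) key := by
  induction l using List.reverseRecOn with
  | nil => rfl
  | append_singleton l x ih =>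
    rw [PySem.List.sorted_eq_foldl_insertBy (l ++ [x]) key, List.foldl_append,
      ← PySem.List.sorted_eq_foldl_insertBy l key]
    simp only [List.foldl_cons, List.foldl_nil]
    rw [pv_filter_insertBy key p x _ (PySem.List.sorted_pairwise l key), ih,
      List.filter_append]
    by_cases hpx : p x
    · rw [if_pos hpx, show List.filter p [x] = [x] by simp [List.filter, hpx],
        PySem.List.sorted_eq_foldl_insertBy (l.filter p ++ [x]) key, List.foldl_append,
        ← PySem.List.sorted_eq_foldl_insertBy (l.filter p) key]
      simp
    · rw [if_neg hpx]
      simp [List.filter, hpx]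

lemma pv_min_split {α : Type} (key : α → Int) (c : Int) (l : List α)
    (hl : l.Pairwise (fun a b => key a ≤ key b)) (hmin : ∀ z ∈ l, c ≤ key z) :
    l = l.filter (fun x => key x == c) ++ l.filter (fun x => !(key x == c)) := by
  induction l with
  | nil => rfl
  | cons a t ih =>
    rw [List.pairwise_cons] at hl
    obtain ⟨ha, ht⟩ := hl
    by_cases hac : key a = c
    · simp only [List.filter_cons, hac, beq_self_eq_true, Bool.not_true, if_true]
      simp only [List.cons_append, List.cons.injEq, true_and]
      exact ih ht (fun z hz => hmin z (List.mem_cons_of_mem a hz))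
    · have hca : c < key a := lt_of_le_of_ne (hmin a (List.mem_cons_self)) (Ne.symm hac)
      have hnone : ∀ z ∈ a :: t, ¬(key z == c) = true := by
        intro z hz
        rcases List.mem_cons.1 hz with h | h
        · simp [h, hac]
        · have := ha z h
          simp only [beq_iff_eq]; omega
      rw [List.filter_eq_nil_iff.2 hnone, List.nil_append,
        List.filter_eq_self.2 (fun z hz => by simp [hnone z hz])]

lemma pv_decomp (vs : List Int) (hvs : vs.Pairwise (· < ·)) (l : List (String × Int))
    (hmem : ∀ x ∈ l, x.2 ∈ vs) :
    PySem.List.sorted l (fun kv => kv.2) = vs.flatMap (fun c => l.filter (fun x => x.2 == c)) := by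
  induction vs generalizing l with
  | nil =>
    have : l = [] := List.eq_nil_iff_forall_not_mem.2 (fun x hx => by simpa using hmem x hx)
    simp [this, PySem.List.sorted_eq_nil_iff]
  | cons c vs ih =>
    rw [List.pairwise_cons] at hvs
    obtain ⟨hc, hvs'⟩ := hvs
    have hS := PySem.List.sorted_pairwise l (fun kv => kv.2)
    have hminS : ∀ z ∈ PySem.List.sorted l (fun kv => kv.2), c ≤ z.2 := by
      intro z hz
      have := hmem z ((PySem.List.mem_sorted l _ false z).1 hz)
      rcases List.mem_cons.1 this with h | h
      · omega
      · exact le_of_lt (hc _ h)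
    have hsplit := pv_min_split (fun kv : String × Int => kv.2) c _ hS hminS
    rw [List.flatMap_cons]
    nth_rewrite 1 [hsplit]
    congr 1
    · rw [pv_filter_sorted]
      apply PySem.List.sorted_eq_self_of_pairwise
      apply List.pairwise_of_forall_mem_list
      intro a haa b hbb
      have h1 := (List.mem_filter.1 haa).2
      have h2 := (List.mem_filter.1 hbb).2
      simp only [beq_iff_eq] at h1 h2
      omega
    · rw [pv_filter_sorted]
      rw [ih hvs' (l.filter (fun x => !(x.2 == c)))
        (fun x hx => by
          have h1 := hmem x (List.mem_of_mem_filter hx)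
          have h2 := (List.mem_filter.1 hx).2
          simp only [Bool.not_eq_eq_eq_not, Bool.not_true, beq_eq_false_iff_ne, ne_eq] at h2
          rcases List.mem_cons.1 h1 with h | h
          · exact absurd h h2
          · exact h)]
      have hfm : ∀ c' ∈ vs, (l.filter (fun x => !(x.2 == c))).filter (fun x => x.2 == c') =
          l.filter (fun x => x.2 == c') := by
        intro c' hc'
        rw [List.filter_filter]
        apply List.filter_congr
        intro x hx
        have : c ≠ c' := by have := hc c' hc'; omega
        by_cases h : x.2 = c' <;> simp [h, this.symm]
      exact List.flatMap_congr hfm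

-- in a strictly increasing list every element is at most the last one
lemma pv_le_getLast (l : List Int) (hp : l.Pairwise (· < ·)) (h : l ≠ []) :
    ∀ v ∈ l, v ≤ l.getLast h := by
  intro v hv
  have hdec := List.dropLast_append_getLast h
  rcases List.mem_append.1 (hdec ▸ hv) with hm | hm
  · have hp' := hdec ▸ hp
    have := (List.pairwise_append.1 hp').2.2 v hm (l.getLast h) (by simp)
    exact le_of_lt this
  · simp at hm; omega

-- membership in dropLast from membership and being different from the last element
lemma pv_mem_dropLast_of_ne {l : List Int} (h : l ≠ []) {v : Int}
    (hv : v ∈ l) (hne : v ≠ l.getLast h) : v ∈ l.dropLast := by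
  have hdec := List.dropLast_append_getLast h
  rcases List.mem_append.1 (hdec ▸ hv) with hm | hm
  · exact hm
  · simp at hm; exact absurd hm hne

-- in a list with distinct keys, the key determines the value
lemma pv_val_eq_of_nodup {l : List (String × Int)} (h : (l.map Prod.fst).Nodup)
    {k : String} {a b : Int} (ha : (k, a) ∈ l) (hb : (k, b) ∈ l) : a = b := by
  induction l with
  | nil => cases ha
  | cons x xs ih =>
    simp only [List.map_cons, List.nodup_cons] at h
    rcases List.mem_cons.1 ha with h1 | h1 <;> rcases List.mem_cons.1 hb with h2 | h2
    · subst h1; exact (Prod.mk.injEq _ _ _ _ ▸ h2 : _ ∧ _).2.symm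
    · subst h1; exact absurd (List.mem_map_of_mem (f := Prod.fst) h2) h.1
    · subst h2; exact absurd (List.mem_map_of_mem (f := Prod.fst) h1) h.1
    · exact ih h.2 h1 h2

-- A's membership-based heeshin filter is the strict band filter (distinct keys, values in [mv, Mv])
lemma pv_band_filter (l : List (String × Int)) (hnodup : (l.map Prod.fst).Nodup)
    (mv Mv : Int) (hmin : ∀ kv ∈ l, mv ≤ kv.2) (hmax : ∀ kv ∈ l, kv.2 ≤ Mv) :
    l.filter (fun kv =>
        !(((l.filter (fun kv => kv.2 == mv)).map (fun kv => kv.1)).contains kv.1) &&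
        !(((l.filter (fun kv => kv.2 == Mv)).map (fun kv => kv.1)).contains kv.1)) =
      l.filter (fun kv => decide (mv < kv.2 ∧ kv.2 < Mv)) := by
  apply List.filter_congr
  intro kv hkv
  have hband : ∀ c : Int,
      (kv.1 ∈ (l.filter (fun kv => kv.2 == c)).map (fun kv => kv.1)) ↔ kv.2 = c := by
    intro c
    constructor
    · intro hm
      simp only [List.mem_map, List.mem_filter, beq_iff_eq] at hm
      obtain ⟨⟨k', v'⟩, ⟨hm', hv'⟩, hk'⟩ := hm
      have hk2 : (kv.1, kv.2) ∈ l := Prod.mk.eta ▸ hkv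
      rw [← hk'] at hk2
      exact (pv_val_eq_of_nodup hnodup hk2 hm').trans hv'
    · intro hc
      exact List.mem_map.2 ⟨kv, List.mem_filter.2 ⟨hkv, by simp [hc]⟩, rfl⟩
  have h1 := hmin kv hkv
  have h2 := hmax kv hkv
  rw [Bool.eq_iff_iff]
  simp only [Bool.and_eq_true, Bool.not_eq_true', List.contains_eq_mem,
    decide_eq_false_iff_not, decide_eq_true_eq, hband mv, hband Mv]
  omega

-- ===== VERDICT (by name: the statement is the Claim_ definition above) =====
theorem pick_yongshin_from_counts_py_spec : Claim_equal_pick_yongshin_from_counts_py := by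
  intro counts _ hpre
  unfold Spec_pick_yongshin_from_counts_py pick_yongshin_from_counts_py
    pick_yongshin_from_counts_py_alt
  by_cases hnil : counts = []
  · simp [hnil]
  · simp only [if_neg hnil]
    -- B's bucket dict: lookups and keys
    have hbget : ∀ c : Int,
        (counts.foldl (fun d kv => d.modify kv.2 [] (fun l => l ++ [kv.1]))
          PySem.Dict.empty).getD c [] =
          (counts.filter (fun x => x.2 == c)).map (fun kv => kv.1) := by
      intro c
      have h := PySem.Dict.getD_foldl_modify_append
        (counts.map (fun kv => (kv.2, kv.1))) PySem.Dict.empty c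
      rw [List.foldl_map] at h
      simpa [List.filter_map, Function.comp_def] using h
    have hkeys :
        (counts.foldl (fun d kv => d.modify kv.2 [] (fun l => l ++ [kv.1]))
          PySem.Dict.empty).keys = PySem.Set.ofList (counts.map (fun kv => kv.2)) := by
      have h := PySem.Dict.keys_foldl_modify_key counts (fun kv => kv.2) []
        (fun _ kv => fun l => l ++ [kv.1]) PySem.Dict.empty
      simpa [PySem.Dict.keys_empty, PySem.Set.ofList_eq_foldl, PySem.Set.update] using h
    rw [hkeys]
    -- the sorted distinct-value list V
    set V := PySem.List.sorted (PySem.Set.ofList (counts.map (fun kv => kv.2)))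
      (fun v => v) with hVdef
    have hVp : V.Pairwise (· < ·) := PySem.List.sorted_ofList_pairwise_lt _
    have hVval : ∀ v, v ∈ V ↔ v ∈ counts.map (fun kv => kv.2) := by
      intro v
      rw [hVdef, PySem.List.mem_sorted]
      exact PySem.Set.mem_ofList _ _
    have hVne : V ≠ [] := by
      obtain ⟨kv, t, rfl⟩ := List.exists_cons_of_ne_nil hnil
      intro hcon
      have : kv.2 ∈ V := (hVval kv.2).2 (by simp)
      simp [hcon] at this
    obtain ⟨v0, W, hV⟩ := List.exists_cons_of_ne_nil hVne
    have hMdef := hVne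
    set M := V.getLast hVne with hM
    -- bounds: every value lies in [v0, M]
    have hv0_le : ∀ v ∈ V, v0 ≤ v := by
      intro v hv
      rcases List.mem_cons.1 (hV ▸ hv) with h | h
      · omega
      · exact le_of_lt ((List.pairwise_cons.1 (hV ▸ hVp)).1 v h)
    have hle_M : ∀ v ∈ V, v ≤ M := pv_le_getLast V hVp hVne
    -- A's items list
    set items := PySem.List.sorted counts (fun kv => kv.2) with hitemsdef
    have hinil : items ≠ [] := by
      rw [hitemsdef, Ne, PySem.List.sorted_eq_nil_iff]; exact hnil
    obtain ⟨i0, it, hitems⟩ := List.exists_cons_of_ne_nil hinil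
    have hmem_items : ∀ kv, kv ∈ items ↔ kv ∈ counts := by
      intro kv; rw [hitemsdef, PySem.List.mem_sorted]
    have hval_V : ∀ kv ∈ counts, kv.2 ∈ V := by
      intro kv hkv
      exact (hVval kv.2).2 (List.mem_map_of_mem hkv)
    -- min_val = v0
    have hmin_eq : (PySem.List.pyGetD items 0 ("", 0)).2 = v0 := by
      rw [hitems, PySem.List.pyGetD_zero_cons]
      have h1 : ∀ y ∈ counts, i0.2 ≤ y.2 :=
        PySem.List.key_head_sorted_le counts (fun kv => kv.2) (hitemsdef ▸ hitems)
      have h2 : v0 ≤ i0.2 :=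
        hv0_le i0.2 (hval_V i0 ((hmem_items i0).1 (hitems ▸ List.mem_cons_self)))
      obtain ⟨kv0, hkv0, hkv0v⟩ := List.mem_map.1 ((hVval v0).1 (hV ▸ List.mem_cons_self))
      have h3 := h1 kv0 hkv0
      omega
    -- max_val = M
    have hmax_le : ∀ kv ∈ counts, kv.2 ≤ (items.getLast hinil).2 := by
      intro kv hkv
      rw [List.getLast_eq_getElem]
      obtain ⟨i, hi, hgi⟩ := List.getElem_of_mem ((hmem_items kv).2 hkv)
      rw [← hgi]
      exact PySem.List.key_sorted_getElem_mono counts (fun kv => kv.2)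
        (p := i) (q := items.length - 1) (by omega)
        (by simp only [hitemsdef] at hi ⊢; omega)
    have hmax_eq : (PySem.List.pyGetD items (-1) ("", 0)).2 = M := by
      rw [PySem.List.pyGetD_neg_one _ _ hinil]
      have h2 : (items.getLast hinil).2 ≤ M :=
        hle_M _ (hval_V _ ((hmem_items _).1 (List.getLast_mem hinil)))
      obtain ⟨kvM, hkvM, hkvMv⟩ := List.mem_map.1 ((hVval M).1 (List.getLast_mem hVne))
      have h3 := hmax_le kvM hkvM
      omega
    rw [hmin_eq, hmax_eq]
    -- single-value classes are already sorted
    have hclass : ∀ c : Int,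
        items.filter (fun kv => kv.2 == c) = counts.filter (fun kv => kv.2 == c) := by
      intro c
      rw [hitemsdef, pv_filter_sorted]
      apply PySem.List.sorted_eq_self_of_pairwise
      apply List.pairwise_of_forall_mem_list
      intro a ha b hb
      have h1 := (List.mem_filter.1 ha).2
      have h2 := (List.mem_filter.1 hb).2
      simp only [beq_iff_eq] at h1 h2
      omega
    -- the middle band
    set mid := W.dropLast with hmid
    have hmidp : mid.Pairwise (· < ·) := by
      have : mid.Sublist V := by
        rw [hV, hmid]
        exact (List.dropLast_sublist W).trans (List.sublist_cons_self v0 W)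
      exact hVp.sublist this
    have hmid_band : ∀ c ∈ mid, v0 < c ∧ c < M := by
      intro c hc
      have hcW : c ∈ W := List.dropLast_sublist W |>.mem hc
      have hcV : c ∈ V := hV ▸ List.mem_cons_of_mem v0 hcW
      constructor
      · exact (List.pairwise_cons.1 (hV ▸ hVp)).1 c hcW
      · have hWne : W ≠ [] := by intro h; rw [h] at hcW; cases hcW
        have hMW : M = W.getLast hWne := by
          simp only [hM, hV, List.getLast_cons hWne]
        have hcd : c ∈ W.dropLast := hmid ▸ hc
        have hne : c ≠ W.getLast hWne := by
          have hdec := List.dropLast_append_getLast hWne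
          have hpW : W.Pairwise (· < ·) := (List.pairwise_cons.1 (hV ▸ hVp)).2
          have hp' := hdec ▸ hpW
          have := (List.pairwise_append.1 hp').2.2 c hcd (W.getLast hWne) (by simp)
          omega
        have := pv_le_getLast W ((List.pairwise_cons.1 (hV ▸ hVp)).2) hWne c hcW
        rw [hMW]
        exact lt_of_le_of_ne this hne
    have hband_mem : ∀ x ∈ counts.filter (fun kv => decide (v0 < kv.2 ∧ kv.2 < M)), x.2 ∈ mid := by
      intro x hx
      have h1 := List.mem_of_mem_filter hx
      have h2 := (List.mem_filter.1 hx).2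
      simp only [decide_eq_true_eq] at h2
      have hxV : x.2 ∈ V := hval_V x h1
      have hxW : x.2 ∈ W := by
        rcases List.mem_cons.1 (hV ▸ hxV) with h | h
        · omega
        · exact h
      have hWne : W ≠ [] := by intro h; rw [h] at hxW; cases hxW
      have hMW : M = W.getLast hWne := by
        simp only [hM, hV, List.getLast_cons hWne]
      rw [hmid]
      exact pv_mem_dropLast_of_ne hWne hxW (by omega)
    -- heeshin: A's membership filter = band filter = decomposition over mid
    have hA_hee : items.filter (fun kv =>
        !(((items.filter (fun kv => kv.2 == v0)).map (fun kv => kv.1)).contains kv.1) &&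
        !(((items.filter (fun kv => kv.2 == M)).map (fun kv => kv.1)).contains kv.1)) =
        mid.flatMap (fun c => counts.filter (fun x => x.2 == c)) := by
      have hnodup : (items.map Prod.fst).Nodup :=
        ((PySem.List.sorted_perm counts (fun kv => kv.2) false).map Prod.fst).nodup_iff.2 hpre
      rw [pv_band_filter items hnodup v0 M
        (fun kv hkv => hv0_le kv.2 (hval_V kv ((hmem_items kv).1 hkv)))
        (fun kv hkv => hle_M kv.2 (hval_V kv ((hmem_items kv).1 hkv)))]
      rw [hitemsdef, pv_filter_sorted,
        pv_decomp mid hmidp _ hband_mem]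
      apply List.flatMap_congr
      intro c hc
      rw [List.filter_filter]
      apply List.filter_congr
      intro x _
      have := hmid_band c hc
      by_cases h : x.2 = c <;> simp [h] <;> omega
    -- B's vals list indexing
    have hB0 : PySem.List.pyGetD V 0 0 = v0 := by
      rw [hV, PySem.List.pyGetD_zero_cons]
    have hBlast : PySem.List.pyGetD V (-1) 0 = M := by
      rw [PySem.List.pyGetD_neg_one _ _ hVne]
    have hBslice : PySem.List.slice V (some 1) (some (-1)) = mid := by
      rw [pv_slice_one_neg_one, hV, hmid]
      rfl
    rw [hB0, hBlast, hBslice]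
    refine congrArg₂ Prod.mk ?_ (congrArg₂ Prod.mk ?_ ?_)
    · rw [hclass v0, hbget v0]
    · rw [hA_hee]
      rw [show (fun c => (counts.foldl (fun d kv => d.modify kv.2 []
            (fun l => l ++ [kv.1])) PySem.Dict.empty).getD c []) =
          (fun c => (counts.filter (fun x => x.2 == c)).map (fun kv => kv.1)) from
          funext hbget]
      rw [List.map_flatMap]
    · rw [hclass M, hbget M]
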